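-- pv_equiv track=rewrite | github.com/appsulautomacao/sistema | core/rag.py | chunk_rag_text
-- ===== SOURCE A (Python) =====
-- def chunk_rag_text(text, max_chars=700):
--     lines = [line.strip() for line in str(text or "").splitlines()]
--     chunks = []
--     current = []
--     current_size = 0
--
--     for line in lines:
--         if not line:
--             if current:
--                 block = "\n".join(current).strip()
--                 if block:
--                     chunks.append(block)
--                 current = []
--                 current_size = 0
--             continue
--
--         if current_size + len(line) > max_chars and current:
--             block = "\n".join(current).strip()
--             if block:
--                 chunks.append(block)
--             current = [line]
--             current_size = len(line)
--             continue
--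
--         current.append(line)
--         current_size += len(line) + 1
--
--     if current:
--         block = "\n".join(current).strip()
--         if block:
--             chunks.append(block)
--
--     return chunks
-- ===== SOURCE B (Python) =====
-- def _pack(para, max_chars):
--     blocks = []
--     current = [para[0]]
--     size = len(para[0]) + 1
--     for line in para[1:]:
--         if size + len(line) > max_chars:
--             blocks.append("\n".join(current))
--             current = [line]
--             size = len(line)
--         else:
--             current.append(line)
--             size += len(line) + 1
--     blocks.append("\n".join(current))
--     return blocks
--
--
-- def chunk_rag_text(text, max_chars=700):
--     paragraphs = []
--     para = []
--     for raw in str(text or "").splitlines():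
--         line = raw.strip()
--         if line:
--             para.append(line)
--         elif para:
--             paragraphs.append(para)
--             para = []
--     if para:
--         paragraphs.append(para)
--     chunks = []
--     for p in paragraphs:
--         chunks.extend(_pack(p, max_chars))
--     return chunks
-- ===== Notes on version B (the rewrite author's own statement) =====
-- stated objective: alternative
-- what changed: A's single stateful loop (current block, size counter, blank-line flushes, redundant strip of already-stripped joined blocks) is replaced by a two-stage decomposition: first group the stripped lines into paragraphs, then greedily pack each paragraph into blocks with a dedicated helper, concatenating the emitted blocks.
import Mathlib
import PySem

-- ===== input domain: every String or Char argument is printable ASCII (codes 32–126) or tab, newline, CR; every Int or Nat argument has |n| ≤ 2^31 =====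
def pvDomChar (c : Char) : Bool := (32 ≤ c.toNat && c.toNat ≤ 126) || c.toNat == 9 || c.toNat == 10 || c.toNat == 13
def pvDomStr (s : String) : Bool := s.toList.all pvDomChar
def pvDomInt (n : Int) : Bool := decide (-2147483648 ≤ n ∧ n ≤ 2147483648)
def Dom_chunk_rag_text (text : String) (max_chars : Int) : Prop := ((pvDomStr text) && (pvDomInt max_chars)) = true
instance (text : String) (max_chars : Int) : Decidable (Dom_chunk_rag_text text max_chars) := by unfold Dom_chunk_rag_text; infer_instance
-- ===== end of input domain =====

-- B replaces A's single stateful loop by a two-stage decomposition (group stripped lines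
-- into paragraphs, then greedily pack each paragraph), dropping the redundant re-strip of
-- joined blocks; objective: simpler/alternative decomposition, same results.

-- ===== PORT A =====
-- loop body of A's 'for line in lines', named as a helper; state = (chunks, current, current_size)
def pvStepA (max_chars : Int) (st : List String × List String × Int) (line : String) :
    List String × List String × Int :=
  match st with
  | (chunks, current, current_size) =>
    if line = "" then
      if current ≠ [] then
        let block := PySem.Str.strip (PySem.Str.join "\n" current)
        ((if block ≠ "" then chunks ++ [block] else chunks), [], 0)
      else (chunks, current, current_size)
    else if current_size + PySem.Str.len line > max_chars ∧ current ≠ [] then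
      let block := PySem.Str.strip (PySem.Str.join "\n" current)
      ((if block ≠ "" then chunks ++ [block] else chunks), [line], PySem.Str.len line)
    else (chunks, current ++ [line], current_size + PySem.Str.len line + 1)

def chunk_rag_text (text : String) (max_chars : Int) : List String :=
  let t : String := if text = "" then "" else text       -- str(text or "")
  let lines := (PySem.Str.splitlines t).map (fun line => PySem.Str.strip line)
  let st := lines.foldl (pvStepA max_chars) ([], [], 0)
  if st.2.1 ≠ [] then
    let block := PySem.Str.strip (PySem.Str.join "\n" st.2.1)
    if block ≠ "" then st.1 ++ [block] else st.1
  else st.1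

-- ===== PORT B =====
-- loop body of _pack's 'for line in para[1:]'; state = (blocks, current, size)
def pvStepP (max_chars : Int) (st : List String × List String × Int) (line : String) :
    List String × List String × Int :=
  match st with
  | (blocks, current, size) =>
    if size + PySem.Str.len line > max_chars then
      (blocks ++ [PySem.Str.join "\n" current], [line], PySem.Str.len line)
    else (blocks, current ++ [line], size + PySem.Str.len line + 1)

-- _pack(para, max_chars); a paragraph is never empty (Python would raise on []), [] is a totality guard
def pvPackPara (para : List String) (max_chars : Int) : List String :=
  match para with
  | [] => []
  | p0 :: rest =>
    let st := rest.foldl (pvStepP max_chars) ([], [p0], PySem.Str.len p0 + 1)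
    st.1 ++ [PySem.Str.join "\n" st.2.1]

-- loop body of B's grouping loop 'for raw in ...'; state = (paragraphs, para)
def pvStepG (st : List (List String) × List String) (raw : String) :
    List (List String) × List String :=
  let line := PySem.Str.strip raw
  if line ≠ "" then (st.1, st.2 ++ [line])
  else if st.2 ≠ [] then (st.1 ++ [st.2], []) else st

def chunk_rag_text_alt (text : String) (max_chars : Int) : List String :=
  let t : String := if text = "" then "" else text       -- str(text or "")
  let gst := (PySem.Str.splitlines t).foldl pvStepG ([], [])
  let paragraphs := if gst.2 ≠ [] then gst.1 ++ [gst.2] else gst.1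
  paragraphs.foldl (fun chunks p => chunks ++ pvPackPara p max_chars) []

-- ===== PRECONDITION & SPEC =====
def Spec_chunk_rag_text (text : String) (max_chars : Int) (out : List String) : Prop := out = chunk_rag_text_alt text max_chars
instance (text : String) (max_chars : Int) (out : List String) : Decidable (Spec_chunk_rag_text text max_chars out) := by unfold Spec_chunk_rag_text; infer_instance

-- ===== CLAIM (what is proved, stated in full; the proofs are below) =====
def Claim_equal_chunk_rag_text : Prop := ∀ (text : String) (max_chars : Int), Dom_chunk_rag_text text max_chars → Spec_chunk_rag_text text max_chars (chunk_rag_text text max_chars)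

-- ===== LEMMAS AND PROOFS =====

-- the common normal form: A's online automaton as a direct recursion producing the chunk list
def pvPack (M : Int) : List String → Int → List String → List String
  | cur, _, [] => if cur = [] then [] else [PySem.Str.join "\n" cur]
  | cur, size, l :: ls =>
    if l = "" then
      if cur = [] then pvPack M cur size ls else PySem.Str.join "\n" cur :: pvPack M [] 0 ls
    else if size + PySem.Str.len l > M ∧ cur ≠ [] then
      PySem.Str.join "\n" cur :: pvPack M [l] (PySem.Str.len l) ls
    else pvPack M (cur ++ [l]) (size + PySem.Str.len l + 1) ls

-- the paragraphs produced by B's grouping loop, as a direct recursion (on stripped lines)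
def pvGroups : List String → List String → List (List String)
  | [], c => if c = [] then [] else [c]
  | l :: ls, c =>
    if l = "" then
      (if c = [] then pvGroups ls [] else c :: pvGroups ls [])
    else pvGroups ls (c ++ [l])

-- ---- whitespace facts ----

lemma pv_head_false {l : List Char} (h : List.dropWhile PySem.Chars.isspace l = l)
    (c : Char) (t : List Char) (hl : l = c :: t) : PySem.Chars.isspace c = false := by
  subst hl
  have hd := List.head?_dropWhile_not PySem.Chars.isspace (c :: t)
  rw [h] at hd
  simpa using hd

lemma pv_lstrip_eq_self_of_head {c : Char} {t : List Char} (h : PySem.Chars.isspace c = false) :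
    PySem.Chars.lstrip (c :: t) = c :: t := by
  simp [PySem.Chars.lstrip, h]

lemma pv_strip_parts {l : List Char} (hs : PySem.Chars.strip l = l) :
    PySem.Chars.lstrip l = l ∧ PySem.Chars.rstrip l = l := by
  have h1 : (PySem.Chars.lstrip l).length ≤ l.length :=
    (List.dropWhile_suffix _).length_le
  have hsub : PySem.Chars.rstrip (PySem.Chars.lstrip l) = l := hs
  have h2 : l.length ≤ (PySem.Chars.lstrip l).length := by
    have := congrArg List.length hsub
    simp only [PySem.Chars.rstrip, List.length_reverse] at this
    have h3 : (List.dropWhile PySem.Chars.isspace (PySem.Chars.lstrip l).reverse).length ≤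
        (PySem.Chars.lstrip l).reverse.length := (List.dropWhile_suffix _).length_le
    simp only [List.length_reverse] at h3
    omega
  have hl : PySem.Chars.lstrip l = l := by
    have := (List.dropWhile_suffix (l := l) PySem.Chars.isspace)
    exact List.IsSuffix.eq_of_length this (le_antisymm h1 h2)
  refine ⟨hl, ?_⟩
  rw [hl] at hsub; exact hsub

lemma pv_rstrip_append {t p : List Char} (hne : p ≠ []) (hp : PySem.Chars.rstrip p = p) :
    PySem.Chars.rstrip (t ++ p) = t ++ p := by
  have hrev : List.dropWhile PySem.Chars.isspace p.reverse = p.reverse := by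
    have := congrArg List.reverse hp
    simpa [PySem.Chars.rstrip] using this
  obtain ⟨c, rest, hcr⟩ : ∃ c rest, p.reverse = c :: rest := by
    cases hpr : p.reverse with
    | nil => exact absurd (by simpa using congrArg List.reverse hpr) hne
    | cons c rest => exact ⟨c, rest, rfl⟩
  have hc : PySem.Chars.isspace c = false := pv_head_false hrev c rest hcr
  show (List.dropWhile PySem.Chars.isspace (t ++ p).reverse).reverse = t ++ p
  rw [List.reverse_append, hcr, List.cons_append, List.dropWhile_cons, hc]
  simp only [Bool.false_eq_true, if_false]
  rw [← List.cons_append, ← hcr, ← List.reverse_append]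
  simp

-- a nonempty list of nonempty stripped parts joins to a nonempty stripped string
lemma pv_join_ok (parts : List (List Char)) (hne : parts ≠ [])
    (h : ∀ p ∈ parts, p ≠ [] ∧ PySem.Chars.strip p = p) :
    PySem.Chars.join ['\n'] parts ≠ [] ∧
    PySem.Chars.strip (PySem.Chars.join ['\n'] parts) = PySem.Chars.join ['\n'] parts := by
  induction parts with
  | nil => exact absurd rfl hne
  | cons p ps ih =>
    obtain ⟨hp, hps⟩ := h p (List.mem_cons_self ..)
    obtain ⟨hlp, hrp⟩ := pv_strip_parts hps
    obtain ⟨c, t, rfl⟩ : ∃ c t, p = c :: t := by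
      cases p with
      | nil => exact absurd rfl hp
      | cons c t => exact ⟨c, t, rfl⟩
    have hc : PySem.Chars.isspace c = false := pv_head_false hlp c t rfl
    cases ps with
    | nil =>
      refine ⟨by simp [PySem.Chars.join, List.intercalate], ?_⟩
      simpa [PySem.Chars.join, List.intercalate] using hps
    | cons q qs =>
      obtain ⟨ihne, ihstrip⟩ := ih (by simp) (fun r hr => h r (List.mem_cons_of_mem _ hr))
      have hjoin : PySem.Chars.join ['\n'] ((c :: t) :: q :: qs)
          = c :: (t ++ '\n' :: PySem.Chars.join ['\n'] (q :: qs)) := by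
        simp [PySem.Chars.join, List.intercalate]
      constructor
      · rw [hjoin]; simp
      · rw [hjoin]
        have hr : PySem.Chars.rstrip (PySem.Chars.join ['\n'] (q :: qs))
            = PySem.Chars.join ['\n'] (q :: qs) := (pv_strip_parts ihstrip).2
        have hrs : PySem.Chars.rstrip (c :: (t ++ '\n' :: PySem.Chars.join ['\n'] (q :: qs)))
            = c :: (t ++ '\n' :: PySem.Chars.join ['\n'] (q :: qs)) := by
          have := pv_rstrip_append (t := c :: t ++ ['\n'])
            (p := PySem.Chars.join ['\n'] (q :: qs)) ihne hr
          simpa using this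
        show PySem.Chars.rstrip (PySem.Chars.lstrip _) = _
        rw [pv_lstrip_eq_self_of_head hc]
        exact hrs

-- string-level corollary
lemma pv_strip_join (cur : List String) (hne : cur ≠ [])
    (h : ∀ l ∈ cur, l ≠ "" ∧ PySem.Str.strip l = l) :
    PySem.Str.strip (PySem.Str.join "\n" cur) = PySem.Str.join "\n" cur ∧
    PySem.Str.join "\n" cur ≠ "" := by
  have hparts : ∀ p ∈ cur.map String.toList, p ≠ [] ∧ PySem.Chars.strip p = p := by
    intro p hp
    obtain ⟨l, hl, rfl⟩ := List.mem_map.1 hp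
    obtain ⟨hl1, hl2⟩ := h l hl
    refine ⟨fun hh => hl1 (String.toList_eq_nil_iff.1 hh), ?_⟩
    have := congrArg String.toList hl2
    rwa [PySem.Str.toList_strip] at this
  have hmapne : cur.map String.toList ≠ [] := by
    intro hh; exact hne (List.map_eq_nil_iff.1 hh)
  obtain ⟨hjne, hjs⟩ := pv_join_ok (cur.map String.toList) hmapne hparts
  have hsep : ("\n" : String).toList = ['\n'] := rfl
  constructor
  · apply String.toList_inj.1
    rw [PySem.Str.toList_strip, PySem.Str.toList_join, hsep, hjs]
  · intro hh
    apply hjne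
    rw [← hsep, ← PySem.Str.toList_join, hh]
    rfl

-- strip is idempotent (so the mapped lines satisfy 'strip l = l')
lemma pv_strip_idem (s : String) : PySem.Str.strip (PySem.Str.strip s) = PySem.Str.strip s := by
  apply String.toList_inj.1
  rw [PySem.Str.toList_strip, PySem.Str.toList_strip]
  set l := s.toList with hldef
  show PySem.Chars.strip (PySem.Chars.strip l) = PySem.Chars.strip l
  set m := PySem.Chars.lstrip l with hm
  have hLm : PySem.Chars.lstrip m = m := List.dropWhile_idempotent _ _
  have hRr : PySem.Chars.rstrip (PySem.Chars.rstrip m) = PySem.Chars.rstrip m := by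
    show (List.dropWhile _ ((List.dropWhile _ m.reverse).reverse).reverse).reverse = _
    rw [List.reverse_reverse, List.dropWhile_idempotent]
    rfl
  have hLr : PySem.Chars.lstrip (PySem.Chars.rstrip m) = PySem.Chars.rstrip m := by
    cases hr : PySem.Chars.rstrip m with
    | nil => rfl
    | cons c t =>
      have hpre : (List.dropWhile PySem.Chars.isspace m.reverse).reverse <+: m := by
        have h1 : (List.dropWhile PySem.Chars.isspace m.reverse).reverse <+: m.reverse.reverse :=
          List.reverse_prefix.2 (List.dropWhile_suffix _)
        simpa using h1
      have hr' : (List.dropWhile PySem.Chars.isspace m.reverse).reverse = c :: t := hr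
      rw [hr'] at hpre
      obtain ⟨u, hu⟩ := hpre
      have hmshape : m = c :: (t ++ u) := by rw [← hu]; simp
      have hc : PySem.Chars.isspace c = false := pv_head_false hLm c (t ++ u) hmshape
      show List.dropWhile _ (c :: t) = c :: t
      rw [List.dropWhile_cons, hc]
      simp
  show PySem.Chars.rstrip (PySem.Chars.lstrip (PySem.Chars.rstrip m)) = PySem.Chars.rstrip m
  rw [hLr, hRr]

-- ---- A-side: the fold plus final flush equals pvPack ----

def pvFinishA (st : List String × List String × Int) : List String :=
  if st.2.1 ≠ [] then
    let block := PySem.Str.strip (PySem.Str.join "\n" st.2.1)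
    if block ≠ "" then st.1 ++ [block] else st.1
  else st.1

lemma pv_Aside (M : Int) (ls : List String) (hls : ∀ l ∈ ls, PySem.Str.strip l = l) :
    ∀ (chunks cur : List String) (size : Int),
      (∀ l ∈ cur, l ≠ "" ∧ PySem.Str.strip l = l) →
      pvFinishA (ls.foldl (pvStepA M) (chunks, cur, size)) = chunks ++ pvPack M cur size ls := by
  induction ls with
  | nil =>
    intro chunks cur size hcur
    by_cases hne : cur = []
    · subst hne; simp [pvFinishA, pvPack]
    · obtain ⟨h1, h2⟩ := pv_strip_join cur hne hcur
      simp [pvFinishA, pvPack, hne, h1, h2]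
  | cons l ls ih =>
    intro chunks cur size hcur
    have hl : PySem.Str.strip l = l := hls l (List.mem_cons_self ..)
    have hls' : ∀ x ∈ ls, PySem.Str.strip x = x := fun x hx => hls x (List.mem_cons_of_mem _ hx)
    rw [List.foldl_cons]
    by_cases hblank : l = ""
    · subst hblank
      by_cases hne : cur = []
      · subst hne
        have hstep : pvStepA M (chunks, [], size) "" = (chunks, [], size) := by
          simp [pvStepA]
        rw [hstep, ih hls' chunks [] size (by simp)]
        simp [pvPack]
      · obtain ⟨h1, h2⟩ := pv_strip_join cur hne hcur
        have hstep : pvStepA M (chunks, cur, size) ""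
            = (chunks ++ [PySem.Str.join "\n" cur], [], 0) := by
          simp [pvStepA, hne, h1, h2]
        rw [hstep, ih hls' _ [] 0 (by simp)]
        simp [pvPack, hne]
    · by_cases hover : size + PySem.Str.len l > M ∧ cur ≠ []
      · obtain ⟨h1, h2⟩ := pv_strip_join cur hover.2 hcur
        have hstep : pvStepA M (chunks, cur, size) l
            = (chunks ++ [PySem.Str.join "\n" cur], [l], PySem.Str.len l) := by
          simp only [pvStepA]
          rw [if_neg hblank, if_pos hover]
          simp [h1, h2]
        rw [hstep, ih hls' _ [l] (PySem.Str.len l) (by simp [hblank, hl])]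
        simp only [pvPack]
        rw [if_neg hblank, if_pos hover]
        simp
      · have hstep : pvStepA M (chunks, cur, size) l
            = (chunks, cur ++ [l], size + PySem.Str.len l + 1) := by
          simp only [pvStepA]
          rw [if_neg hblank, if_neg hover]
        rw [hstep, ih hls' chunks (cur ++ [l]) (size + PySem.Str.len l + 1) ?_]
        · simp only [pvPack]
          rw [if_neg hblank, if_neg hover]
        · intro x hx
          rcases List.mem_append.1 hx with hx | hx
          · exact hcur x hx
          · simp at hx; subst hx; exact ⟨hblank, hl⟩

-- ---- B-side ----

lemma pv_Gside (raws : List String) :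
    ∀ (P : List (List String)) (c : List String),
      (let g := raws.foldl pvStepG (P, c)
       if g.2 ≠ [] then g.1 ++ [g.2] else g.1)
      = P ++ pvGroups (raws.map (fun r => PySem.Str.strip r)) c := by
  induction raws with
  | nil =>
    intro P c
    by_cases hc : c = [] <;> simp [pvGroups, hc]
  | cons r raws ih =>
    intro P c
    rw [List.foldl_cons, List.map_cons]
    by_cases hr : PySem.Str.strip r = ""
    · by_cases hc : c = []
      · subst hc
        simp only [pvStepG, hr, ne_eq, not_true_eq_false, if_false]
        rw [ih P []]
        simp [pvGroups]
      · simp only [pvStepG, hr, ne_eq, hc, not_false_eq_true, if_true, not_true_eq_false,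
          if_false]
        rw [ih (P ++ [c]) []]
        simp [pvGroups, hc]
    · simp only [pvStepG, hr, ne_eq, not_false_eq_true, if_true]
      rw [ih P (c ++ [PySem.Str.strip r])]
      simp [pvGroups, hr]

lemma pv_pcur_ne (M : Int) (xs : List String) :
    ∀ st : List String × List String × Int, st.2.1 ≠ [] →
      (xs.foldl (pvStepP M) st).2.1 ≠ [] := by
  induction xs with
  | nil => intro st h; exact h
  | cons x xs ih =>
    intro st h
    rw [List.foldl_cons]
    apply ih
    obtain ⟨b, c, s⟩ := st
    by_cases hov : M < s + (x.length : Int) <;> simp [pvStepP, hov]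

-- combined B-side induction: flatMap pack over groups equals pvPack
lemma pv_Z (M : Int) (ls : List String) :
    (∀ (c0 : String) (ctail : List String),
      (pvGroups ls (c0 :: ctail)).flatMap (fun p => pvPackPara p M)
      = (ctail.foldl (pvStepP M) ([], [c0], PySem.Str.len c0 + 1)).1
        ++ pvPack M (ctail.foldl (pvStepP M) ([], [c0], PySem.Str.len c0 + 1)).2.1
                    (ctail.foldl (pvStepP M) ([], [c0], PySem.Str.len c0 + 1)).2.2 ls)
    ∧ ((pvGroups ls []).flatMap (fun p => pvPackPara p M) = pvPack M [] 0 ls) := by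
  induction ls with
  | nil =>
    constructor
    · intro c0 ctail
      set st := ctail.foldl (pvStepP M) ([], [c0], PySem.Str.len c0 + 1) with hst
      have hne : st.2.1 ≠ [] := pv_pcur_ne M ctail _ (by simp)
      have hg : pvGroups [] (c0 :: ctail) = [c0 :: ctail] := by simp [pvGroups]
      rw [hg]
      have hpp : pvPackPara (c0 :: ctail) M = st.1 ++ [PySem.Str.join "\n" st.2.1] := by
        rw [pvPackPara]
      simp only [List.flatMap_cons, List.flatMap_nil, List.append_nil, hpp]
      simp [pvPack, hne]
    · simp [pvGroups, pvPack]
  | cons l ls ih =>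
    obtain ⟨ih1, ih2⟩ := ih
    constructor
    · intro c0 ctail
      by_cases hblank : l = ""
      · subst hblank
        set st := ctail.foldl (pvStepP M) ([], [c0], PySem.Str.len c0 + 1) with hst
        have hne : st.2.1 ≠ [] := pv_pcur_ne M ctail _ (by simp)
        have hg : pvGroups ("" :: ls) (c0 :: ctail) = (c0 :: ctail) :: pvGroups ls [] := by
          simp [pvGroups]
        rw [hg, List.flatMap_cons, ih2]
        have hpp : pvPackPara (c0 :: ctail) M = st.1 ++ [PySem.Str.join "\n" st.2.1] := by
          rw [pvPackPara]
        rw [hpp]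
        simp [pvPack, hne]
      · have hg : pvGroups (l :: ls) (c0 :: ctail) = pvGroups ls ((c0 :: ctail) ++ [l]) := by
          simp [pvGroups, hblank]
        rw [hg]
        have happ : (c0 :: ctail) ++ [l] = c0 :: (ctail ++ [l]) := by simp
        rw [happ, ih1 c0 (ctail ++ [l]), List.foldl_append]
        set st := ctail.foldl (pvStepP M) ([], [c0], PySem.Str.len c0 + 1) with hst
        have hne : st.2.1 ≠ [] := pv_pcur_ne M ctail _ (by simp)
        obtain ⟨b, c, s⟩ := st
        simp only at hne
        by_cases hov : M < s + (l.length : Int)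
        · have hstep : pvStepP M (b, c, s) l
              = (b ++ [PySem.Str.join "\n" c], [l], PySem.Str.len l) := by
            simp [pvStepP, hov]
          simp only [List.foldl_cons, List.foldl_nil, hstep]
          simp [pvPack, hblank, hov, hne]
        · have hstep : pvStepP M (b, c, s) l
              = (b, c ++ [l], s + PySem.Str.len l + 1) := by
            simp [pvStepP, hov]
          simp only [List.foldl_cons, List.foldl_nil, hstep]
          simp [pvPack, hblank, hov]
    · by_cases hblank : l = ""
      · subst hblank
        have hg : pvGroups ("" :: ls) [] = pvGroups ls [] := by simp [pvGroups]
        rw [hg, ih2]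
        simp [pvPack]
      · have hg : pvGroups (l :: ls) [] = pvGroups ls [l] := by simp [pvGroups, hblank]
        rw [hg]
        have h1 := ih1 l []
        simp only [List.foldl_nil] at h1
        rw [h1]
        simp [pvPack, hblank]

-- ===== VERDICT (by name: the statement is the Claim_ definition above) =====
theorem chunk_rag_text_spec : Claim_equal_chunk_rag_text := by
  intro text max_chars _
  show chunk_rag_text text max_chars = chunk_rag_text_alt text max_chars
  unfold chunk_rag_text chunk_rag_text_alt
  set t : String := if text = "" then "" else text with ht
  set raws := PySem.Str.splitlines t with hraws
  set ls := raws.map (fun line => PySem.Str.strip line) with hls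
  have hstripped : ∀ l ∈ ls, PySem.Str.strip l = l := by
    intro l hl
    rw [hls] at hl
    obtain ⟨r, _, rfl⟩ := List.mem_map.1 hl
    exact pv_strip_idem r
  -- A side
  have hA := pv_Aside max_chars ls hstripped [] [] 0 (by simp)
  simp only [pvFinishA] at hA
  rw [hA]
  -- B side
  have hG := pv_Gside raws [] []
  simp only [List.nil_append] at hG
  show [] ++ pvPack max_chars [] 0 ls =
    List.foldl (fun chunks p => chunks ++ pvPackPara p max_chars) []
      (if (List.foldl pvStepG ([], []) raws).2 ≠ [] then
        (List.foldl pvStepG ([], []) raws).1 ++ [(List.foldl pvStepG ([], []) raws).2]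
      else (List.foldl pvStepG ([], []) raws).1)
  rw [hG, PySem.List.foldl_append_eq_flatMap,
    (pv_Z max_chars (raws.map (fun r => PySem.Str.strip r))).2]
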